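-- pv_equiv track=rewrite | github.com/VasyaPupkin120/ew | utilities/convert.py | notgoodline
-- ===== SOURCE A (Python) =====
-- def notgoodline(some):
--     """
--     Исключает те слова, в которых найдены цифры, тире или подчеркивания.
--     """
--     for i in range(0, 10):
--         if str(i) in some:
--             return False
--     if len(some) <= 2:
--         return False
--     if "_" in some:
--         return False
--     if "-" in some:
--         return False
--     return True
-- ===== SOURCE B (Python) =====
-- def notgoodline(some):
--     """
--     Исключает те слова, в которых найдены цифры, тире или подчеркивания.
--     """
--     if len(some) <= 2:
--         return False
--     bad = set("0123456789_-")
--     return not any(c in bad for c in some)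
-- ===== Notes on version B (the rewrite author's own statement) =====
-- stated objective: simpler
-- what changed: B replaces A's ten substring scans (one per digit) plus two more substring tests with a length guard followed by a single pass over the characters testing membership in one bad-character set.
import Mathlib
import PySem

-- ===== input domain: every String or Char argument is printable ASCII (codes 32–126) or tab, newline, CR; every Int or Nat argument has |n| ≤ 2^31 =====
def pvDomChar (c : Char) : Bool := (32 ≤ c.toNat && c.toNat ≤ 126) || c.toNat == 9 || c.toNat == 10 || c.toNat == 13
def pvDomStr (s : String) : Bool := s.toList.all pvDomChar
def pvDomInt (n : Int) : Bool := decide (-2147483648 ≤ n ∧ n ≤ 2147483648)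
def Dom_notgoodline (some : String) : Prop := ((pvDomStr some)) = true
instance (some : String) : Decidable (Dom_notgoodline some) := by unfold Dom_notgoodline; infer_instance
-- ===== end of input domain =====

-- B replaces A's twelve substring scans with a length guard and one pass testing set membership (simpler).


-- ===== PORT A =====
-- the trailing checks after the digit loop: len <= 2, "_" in some, "-" in some
def notgoodlineTail (some : String) : Bool :=
  if PySem.Str.len some ≤ 2 then false
  else if PySem.Str.isIn "_" some then false
  else if PySem.Str.isIn "-" some then false
  else true

-- 'for i in range(0, 10): if str(i) in some: return False'
def notgoodlineLoop (some : String) : List Int → Bool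
  | [] => notgoodlineTail some
  | i :: rest => if PySem.Str.isIn (PySem.Int.toStr i) some then false
                 else notgoodlineLoop some rest

def notgoodline (some : String) : Bool :=
  notgoodlineLoop some (PySem.List.pyRange 0 10 1)

-- ===== PORT B =====
def notgoodline_alt (some : String) : Bool :=
  if PySem.Str.len some ≤ 2 then false
  else
    let bad : PySem.Set Char := PySem.Set.ofList "0123456789_-".toList
    !(some.toList.any (fun c => PySem.Set.contains bad c))

-- ===== PRECONDITION & SPEC =====
def Spec_notgoodline (some : String) (out : Bool) : Prop := out = notgoodline_alt some
instance (some : String) (out : Bool) : Decidable (Spec_notgoodline some out) := by unfold Spec_notgoodline; infer_instance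

-- ===== CLAIM (what is proved, stated in full; the proofs are below) =====
def Claim_equal_notgoodline : Prop := ∀ (some : String), Dom_notgoodline some → Spec_notgoodline some (notgoodline some)

-- ===== LEMMAS AND PROOFS =====

-- a one-character Python substring test is character membership
theorem isIn_single (c : Char) (s : String) :
    PySem.Str.isIn (String.ofList [c]) s = s.toList.contains c := by
  rw [Bool.eq_iff_iff, PySem.Str.isIn_iff_infix]
  simp [List.singleton_infix_iff]


theorem any_bad (l : List Char) :
    (l.any fun c => List.contains ['0','1','2','3','4','5','6','7','8','9','_','-'] c) = true ↔
    ('0' ∈ l ∨ '1' ∈ l ∨ '2' ∈ l ∨ '3' ∈ l ∨ '4' ∈ l ∨ '5' ∈ l ∨ '6' ∈ l ∨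
     '7' ∈ l ∨ '8' ∈ l ∨ '9' ∈ l ∨ '_' ∈ l ∨ '-' ∈ l) := by
  simp only [List.any_eq_true, List.contains_iff_mem]
  constructor
  · rintro ⟨c, hc, hb⟩
    fin_cases hb <;> tauto
  · intro h
    rcases h with h | h | h | h | h | h | h | h | h | h | h | h <;> exact ⟨_, h, by decide⟩

-- ===== VERDICT (by name: the statement is the Claim_ definition above) =====
set_option maxHeartbeats 2000000 in
theorem notgoodline_spec : Claim_equal_notgoodline := by
  intro some _
  unfold Spec_notgoodline notgoodline notgoodline_alt
  have h0 := isIn_single '0' some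
  have h1 := isIn_single '1' some
  have h2 := isIn_single '2' some
  have h3 := isIn_single '3' some
  have h4 := isIn_single '4' some
  have h5 := isIn_single '5' some
  have h6 := isIn_single '6' some
  have h7 := isIn_single '7' some
  have h8 := isIn_single '8' some
  have h9 := isIn_single '9' some
  have hu := isIn_single '_' some
  have hd := isIn_single '-' some
  simp only [show PySem.List.pyRange 0 10 1 = [0,1,2,3,4,5,6,7,8,9] from by decide,
    notgoodlineLoop, notgoodlineTail, show (PySem.Int.toStr 0) = "0" from rfl,
    show (PySem.Int.toStr 1) = "1" from rfl, show (PySem.Int.toStr 2) = "2" from rfl,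
    show (PySem.Int.toStr 3) = "3" from rfl, show (PySem.Int.toStr 4) = "4" from rfl,
    show (PySem.Int.toStr 5) = "5" from rfl, show (PySem.Int.toStr 6) = "6" from rfl,
    show (PySem.Int.toStr 7) = "7" from rfl, show (PySem.Int.toStr 8) = "8" from rfl,
    show (PySem.Int.toStr 9) = "9" from rfl]
  rw [show ("0" : String) = String.ofList ['0'] from rfl, h0,
      show ("1" : String) = String.ofList ['1'] from rfl, h1,
      show ("2" : String) = String.ofList ['2'] from rfl, h2,
      show ("3" : String) = String.ofList ['3'] from rfl, h3,
      show ("4" : String) = String.ofList ['4'] from rfl, h4,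
      show ("5" : String) = String.ofList ['5'] from rfl, h5,
      show ("6" : String) = String.ofList ['6'] from rfl, h6,
      show ("7" : String) = String.ofList ['7'] from rfl, h7,
      show ("8" : String) = String.ofList ['8'] from rfl, h8,
      show ("9" : String) = String.ofList ['9'] from rfl, h9,
      show ("_" : String) = String.ofList ['_'] from rfl, hu,
      show ("-" : String) = String.ofList ['-'] from rfl, hd]
  simp only [PySem.Set.contains_eq_listContains,
    show (PySem.Set.ofList "0123456789_-".toList : List Char) =
        ['0','1','2','3','4','5','6','7','8','9','_','-'] from by decide]
  by_cases L : PySem.Str.len some ≤ 2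
  · simp only [if_pos L, ite_self]
  · rw [if_neg L, if_neg L, Bool.eq_iff_iff,
      show ∀ x : Bool, ((!x) = true ↔ ¬ (x = true)) from by decide, any_bad]
    simp only [List.contains_iff_mem]
    split_ifs with d0 d1 d2 d3 d4 d5 d6 d7 d8 d9 du dd <;>
      [tauto; tauto; tauto; tauto; tauto; tauto; tauto; tauto; tauto; tauto; tauto; tauto;
       exact iff_of_true rfl (by tauto)]
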